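-- pv_equiv track=rewrite | github.com/bagar0x60/automata-hw | HW2/src/statemachine.py | _iter_with_level
-- ===== SOURCE A (Python) =====
-- def _iter_with_level(regexp: str):
--     level = 0
--     for c in regexp:
--         if c == '(':
--             level += 1
--         elif c == ')':
--             level -= 1
--         yield (level, c)
-- ===== SOURCE B (Python) =====
-- def _balance(s):
--     return s.count('(') - s.count(')')
--
-- def _levels(s, base):
--     """Divide and conquer: levels of s starting from nesting level `base`."""
--     if not s:
--         return []
--     if len(s) == 1:
--         return [(base + _balance(s), s)]
--     mid = len(s) // 2
--     left, right = s[:mid], s[mid:]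
--     return _levels(left, base) + _levels(right, base + _balance(left))
--
-- def _iter_with_level(regexp: str):
--     yield from _levels(regexp, 0)
-- ===== Notes on version B (the rewrite author's own statement) =====
-- stated objective: alternative
-- what changed: Replaces the single-pass running counter by a divide-and-conquer decomposition: the string is split in half, each half is solved recursively, and the right half's base level is offset by the left half's paren balance computed with str.count.
import Mathlib
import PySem

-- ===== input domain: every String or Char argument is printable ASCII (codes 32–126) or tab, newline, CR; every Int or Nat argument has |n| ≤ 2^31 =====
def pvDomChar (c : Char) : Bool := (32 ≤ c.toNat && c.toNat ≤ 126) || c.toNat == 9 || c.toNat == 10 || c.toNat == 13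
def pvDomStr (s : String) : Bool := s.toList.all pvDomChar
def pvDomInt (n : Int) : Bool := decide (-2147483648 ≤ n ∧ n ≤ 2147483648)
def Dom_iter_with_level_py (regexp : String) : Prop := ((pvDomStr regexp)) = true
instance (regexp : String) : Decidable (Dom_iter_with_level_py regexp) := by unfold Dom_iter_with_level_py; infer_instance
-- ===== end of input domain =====

-- B replaces A's running-counter pass by a divide-and-conquer decomposition (split in half, offset the right half's base by the left half's paren balance); objective: alternative, same return value.


-- ===== PORT A =====
-- A: one pass with a running counter `level`, post-updated before each yield.
def iterA_go : List Char → Int → List (Int × String)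
  | [], _ => []
  | c :: cs, level =>
    let level' : Int := if c = '(' then level + 1 else if c = ')' then level - 1 else level
    (level', String.ofList [c]) :: iterA_go cs level'

def iter_with_level_py (regexp : String) : List (Int × String) :=
  iterA_go regexp.toList 0

-- ===== PORT B =====
-- B (Source B): divide and conquer — split in half, solve each half recursively,
-- offset the right half's base by the left half's paren balance (_balance).
def pvBalance (s : List Char) : Int := (s.count '(' : Int) - (s.count ')' : Int)

def pvLevels : List Char → Int → List (Int × String)
  | [], _ => []
  | [c], base => [(base + pvBalance [c], String.ofList [c])]
  | a :: b :: rest, base =>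
    let s := a :: b :: rest
    let mid := s.length / 2
    let left := s.take mid
    let right := s.drop mid
    pvLevels left base ++ pvLevels right (base + pvBalance left)
  termination_by s _ => s.length
  decreasing_by all_goals simp_all; omega

def iter_with_level_py_alt (regexp : String) : List (Int × String) :=
  pvLevels regexp.toList 0

-- ===== PRECONDITION & SPEC =====
def Spec_iter_with_level_py (regexp : String) (out : List (Int × String)) : Prop := out = iter_with_level_py_alt regexp
instance (regexp : String) (out : List (Int × String)) : Decidable (Spec_iter_with_level_py regexp out) := by unfold Spec_iter_with_level_py; infer_instance

-- ===== CLAIM (what is proved, stated in full; the proofs are below) =====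
def Claim_equal_iter_with_level_py : Prop := ∀ (regexp : String), Dom_iter_with_level_py regexp → Spec_iter_with_level_py regexp (iter_with_level_py regexp)

-- ===== LEMMAS AND PROOFS =====

-- ===== VERDICT (by name: the statement is the Claim_ definition above) =====
-- A's running level after consuming one char c from level l is l + pvBalance [c]
theorem pv_step (c : Char) (l : Int) :
    (if c = '(' then l + 1 else if c = ')' then l - 1 else l) = l + pvBalance [c] := by
  by_cases h1 : c = '(' <;> by_cases h2 : c = ')' <;> simp [h1, h2, pvBalance, sub_eq_add_neg]

-- A's loop splits over append, with the level offset by the left part's balance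
theorem pv_go_append (xs : List Char) : ∀ (ys : List Char) (l : Int),
    iterA_go (xs ++ ys) l = iterA_go xs l ++ iterA_go ys (l + pvBalance xs) := by
  induction xs with
  | nil => intro ys l; simp [iterA_go, pvBalance]
  | cons c xs ih =>
    intro ys l
    simp only [List.cons_append, iterA_go, pv_step, ih, List.cons_append]
    have : l + pvBalance [c] + pvBalance xs = l + pvBalance (c :: xs) := by
      simp [pvBalance, List.count_cons]
      by_cases h1 : c = '(' <;> by_cases h2 : c = ')' <;> simp [h1, h2] <;> push_cast <;> ring
    rw [this]

theorem pv_levels_eq (s : List Char) (base : Int) :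
    pvLevels s base = iterA_go s base := by
  induction s, base using pvLevels.induct with
  | case1 base => simp [pvLevels, iterA_go]
  | case2 c base =>
    simp only [pvLevels, iterA_go, pv_step]
  | case3 a b rest base s mid left right ihl ihr =>
    simp only [pvLevels]
    rw [ihl, ihr, ← pv_go_append, List.take_append_drop]

theorem iter_with_level_py_spec : Claim_equal_iter_with_level_py := by
  intro regexp _
  unfold Spec_iter_with_level_py iter_with_level_py iter_with_level_py_alt
  exact (pv_levels_eq regexp.toList 0).symm
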